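-- pv_equiv track=rewrite | github.com/MarcSR24/TFG-code | phoc.py | create_hist
-- ===== SOURCE A (Python) =====
-- LETTERS = "abcdefghijklmnopqrstuvwxyzñç0123456789"
--
-- LETTERS_SET = set(LETTERS)
--
-- def initialize_hist() -> list[int]:
--     """
--     Creates the data structure for one histogram
--
--     Returns:
--         hist : list of integer
--             A list of size len(LETTERS) with all values initialized at 0
--     """
--     hist = [0] * len(LETTERS)
--     return hist
--
-- def create_hist(word : str, level_split : list) -> list[int]:
--     """
--     Creates the histogram vector of the given level for the word
--
--     Parameters:
--         word : string
--             The word to which PHOC is being applied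
--         level_split : list of strings
--     Returns:
--         hist_list : list of list of integers
--             A list containing the concatenation of the level's histograms of each split
--     """
--     assert(type(word) == str)
--
--     hist_list = []
--     # For each split in the word
--     for split in level_split:
--         hist = initialize_hist()
--         # For each character in the split
--         for letter in split:
--            # Check if the character is in the abecedary
--             if letter in LETTERS_SET:
--                 idx = LETTERS.index(letter)
--                 # If the character exists, increase the number of repetitions
--                 hist[idx] += 1
--         # Add the histogram of the current split to the PHOC of the level's vector
--         hist_list = hist_list + hist
--     return hist_list
-- ===== SOURCE B (Python) =====
-- LETTERS = "abcdefghijklmnopqrstuvwxyzñç0123456789"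
--
-- def create_hist(word : str, level_split : list) -> list[int]:
--     """Per split, scan the split once per alphabet letter and record how many
--     times that letter occurs; concatenate the per-split histograms."""
--     assert(type(word) == str)
--     return [split.count(c) for split in level_split for c in LETTERS]
-- ===== Notes on version B (the rewrite author's own statement) =====
-- stated objective: faster
-- what changed: Replaces A's single accumulating pass per split (membership test + LETTERS.index + in-place increment, then 'hist_list = hist_list + hist' which recopies the whole output for every split) by one flat comprehension that scans each split once per alphabet letter with str.count and builds the output once.
import Mathlib
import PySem

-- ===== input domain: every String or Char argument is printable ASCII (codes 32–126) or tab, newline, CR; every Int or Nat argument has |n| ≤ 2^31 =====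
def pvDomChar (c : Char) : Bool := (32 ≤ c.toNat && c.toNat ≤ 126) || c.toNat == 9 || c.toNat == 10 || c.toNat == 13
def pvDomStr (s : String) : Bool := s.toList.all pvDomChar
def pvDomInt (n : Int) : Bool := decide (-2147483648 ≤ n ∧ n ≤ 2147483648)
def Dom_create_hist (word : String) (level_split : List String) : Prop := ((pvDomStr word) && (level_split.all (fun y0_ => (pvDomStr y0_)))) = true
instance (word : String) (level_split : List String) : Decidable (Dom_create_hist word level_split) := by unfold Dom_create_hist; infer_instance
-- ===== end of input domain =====

-- B replaces A's single accumulating pass (membership + LETTERS.index + in-place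
-- increment, then list concatenation) by one flat per-letter count comprehension: simpler.

-- LETTERS, shared module constant of both programs
def pvLetters : List Char := "abcdefghijklmnopqrstuvwxyzñç0123456789".toList

-- ===== PORT A =====
-- one step of A's inner loop: 'if letter in LETTERS_SET: hist[LETTERS.index(letter)] += 1'
def pvStepA (hist : List Int) (letter : Char) : List Int :=
  if letter ∈ pvLetters then
    match PySem.List.index? pvLetters letter with
    | some i => hist.set i (hist.getD i 0 + 1)
    | none => hist   -- unreachable: the membership guard ensures index? succeeds
  else hist

def create_hist (word : String) (level_split : List String) : List Int :=
  -- assert(type(word) == str) always passes; word is otherwise unused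
  level_split.foldl
    (fun hist_list split =>
      hist_list ++ split.toList.foldl pvStepA (List.replicate pvLetters.length 0))
    []

-- ===== PORT B =====
def create_hist_alt (word : String) (level_split : List String) : List Int :=
  level_split.flatMap (fun split => pvLetters.map (fun c => (split.toList.count c : Int)))

-- ===== PRECONDITION & SPEC =====
def Spec_create_hist (word : String) (level_split : List String) (out : List Int) : Prop := out = create_hist_alt word level_split
instance (word : String) (level_split : List String) (out : List Int) : Decidable (Spec_create_hist word level_split out) := by unfold Spec_create_hist; infer_instance

-- ===== CLAIM (what is proved, stated in full; the proofs are below) =====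
def Claim_equal_create_hist : Prop := ∀ (word : String) (level_split : List String), Dom_create_hist word level_split → Spec_create_hist word level_split (create_hist word level_split)

-- ===== LEMMAS AND PROOFS =====

-- incrementing the slot LETTERS.index(c) of a histogram that is 'ls.map f'
-- yields the histogram of the pointwise-bumped function (ls nodup, c ∈ ls)
theorem pv_idxOf?_eq_some {l : List Char} {c : Char} (h : c ∈ l) :
    l.idxOf? c = some (l.idxOf c) := by
  induction l with
  | nil => cases h
  | cons a t ih =>
    by_cases hac : a = c
    · subst hac; simp [List.idxOf?_cons, List.idxOf_cons_self]
    · rcases List.mem_cons.mp h with h1 | h1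
      · exact absurd h1.symm hac
      · simp [List.idxOf?_cons, hac, beq_iff_eq, ih h1]

-- incrementing the slot LETTERS.index(c) of a histogram that is 'ls.map f'
-- yields the histogram of the pointwise-bumped function (ls nodup, c ∈ ls)
theorem pv_set_map {ls : List Char} (hnd : ls.Nodup) {c : Char} (hc : c ∈ ls) (f : Char → Int) :
    (ls.map f).set (ls.idxOf c) ((ls.map f).getD (ls.idxOf c) 0 + 1)
      = ls.map (fun x => if x = c then f x + 1 else f x) := by
  induction ls with
  | nil => cases hc
  | cons h t ih =>
    by_cases hhc : h = c
    · subst hhc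
      simp [List.idxOf_cons_self]
      intro x hx hxh
      exact (List.nodup_cons.mp hnd).1 (hxh ▸ hx)
    · have hct : c ∈ t := by
        rcases List.mem_cons.mp hc with h1 | h1
        · exact absurd h1.symm hhc
        · exact h1
      have hIdx : (h :: t).idxOf c = t.idxOf c + 1 := List.idxOf_cons_ne _ (by exact hhc)
      have ih' := ih (List.nodup_cons.mp hnd).2 hct
      simp [hIdx, hhc] at ih' ⊢
      exact ih'

theorem pv_letters_nodup : pvLetters.Nodup := by decide

-- A's inner loop over a split, started from any histogram of the form 'pvLetters.map f',
-- computes the per-letter counts added to f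
theorem pv_inner (l : List Char) : ∀ f : Char → Int,
    l.foldl pvStepA (pvLetters.map f)
      = pvLetters.map (fun x => f x + (l.count x : Int)) := by
  induction l with
  | nil => intro f; simp
  | cons c l ih =>
    intro f
    by_cases hc : c ∈ pvLetters
    · have hidx : PySem.List.index? pvLetters c = some (pvLetters.idxOf c) := by
        rw [PySem.List.index?_eq_idxOf?]
        exact pv_idxOf?_eq_some hc
      have hstep : pvStepA (pvLetters.map f) c
          = pvLetters.map (fun x => if x = c then f x + 1 else f x) := by
        simp only [pvStepA, if_pos hc, hidx]
        exact pv_set_map pv_letters_nodup hc f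
      rw [List.foldl_cons, hstep, ih]
      refine List.map_congr_left (fun x _ => ?_)
      by_cases hxc : x = c
      · simp only [hxc, List.count_cons_self]
        push_cast; ring
      · simp [hxc, Ne.symm hxc]
    · have hstep : pvStepA (pvLetters.map f) c = pvLetters.map f := by
        simp [pvStepA, hc]
      rw [List.foldl_cons, hstep, ih]
      refine List.map_congr_left (fun x hx => ?_)
      have hxc : x ≠ c := fun h => hc (h ▸ hx)
      simp [Ne.symm hxc]

-- ===== VERDICT (by name: the statement is the Claim_ definition above) =====
theorem create_hist_spec : Claim_equal_create_hist := by
  intro word level_split _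
  unfold Spec_create_hist create_hist create_hist_alt
  have hrepl : List.replicate pvLetters.length (0 : Int)
      = pvLetters.map (fun _ => (0 : Int)) := by simp
  have hbody : ∀ split : String,
      split.toList.foldl pvStepA (List.replicate pvLetters.length 0)
        = pvLetters.map (fun c => (split.toList.count c : Int)) := by
    intro split
    rw [hrepl, pv_inner]
    simp
  calc level_split.foldl
        (fun hist_list split =>
          hist_list ++ split.toList.foldl pvStepA (List.replicate pvLetters.length 0)) []
      = [] ++ level_split.flatMap
          (fun split => split.toList.foldl pvStepA (List.replicate pvLetters.length 0)) :=
        PySem.List.foldl_append_eq_flatMap _ _ _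
    _ = level_split.flatMap (fun split => pvLetters.map (fun c => (split.toList.count c : Int))) := by
        simp only [List.nil_append]
        exact List.flatMap_congr (fun split _ => hbody split)
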